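-- pv_equiv track=rewrite | github.com/Kianni/tuas_olio_ohjelmointi | exercise_1/arithmeticProgression.py | build_progression
-- ===== SOURCE A (Python) =====
-- def build_progression(max_value):
--     sum = 0
--     sum_squares = 0
--     count = 0
--     for i in range(3, max_value + 1, 3):
--         sum += i
--         sum_squares += i ** 2
--         count += 1
--     return sum, sum_squares, count
-- ===== SOURCE B (Python) =====
-- def build_progression(max_value):
--     # Closed-form arithmetic-series formulas: n terms 3,6,...,3n with n = max(max_value,0)//3.
--     n = max(max_value, 0) // 3
--     total = 3 * n * (n + 1) // 2
--     total_squares = 3 * n * (n + 1) * (2 * n + 1) // 2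
--     return total, total_squares, n
-- ===== Notes on version B (the rewrite author's own statement) =====
-- stated objective: faster
-- what changed: Replaced the O(max_value) accumulation loop over range(3, max_value+1, 3) with O(1) closed-form arithmetic-series formulas (sum, sum of squares, count) with n = max(max_value,0)//3.
import Mathlib
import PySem

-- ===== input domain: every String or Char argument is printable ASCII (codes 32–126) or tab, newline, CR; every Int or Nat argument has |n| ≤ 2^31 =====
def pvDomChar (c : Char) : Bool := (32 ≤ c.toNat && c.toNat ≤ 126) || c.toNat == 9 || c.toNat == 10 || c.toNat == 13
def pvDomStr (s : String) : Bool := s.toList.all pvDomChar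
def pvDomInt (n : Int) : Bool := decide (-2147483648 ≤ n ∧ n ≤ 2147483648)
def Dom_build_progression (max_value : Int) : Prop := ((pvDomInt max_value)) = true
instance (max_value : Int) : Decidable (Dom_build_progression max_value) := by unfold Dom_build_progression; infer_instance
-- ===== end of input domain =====

-- B replaces A's O(max_value) accumulation loop by O(1) closed-form arithmetic-series formulas.


-- ===== PORT A =====
-- sum, sum_squares, count accumulated over range(3, max_value+1, 3)
def build_progression (max_value : Int) : List Int :=
  let st := (PySem.List.pyRange 3 (max_value + 1) 3).foldl
    (fun (st : Int × Int × Int) i => (st.1 + i, st.2.1 + i ^ 2, st.2.2 + 1))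
    (0, 0, 0)
  [st.1, st.2.1, st.2.2]

-- ===== PORT B =====
def build_progression_alt (max_value : Int) : List Int :=
  let n := PySem.Int.floordiv (max max_value 0) 3
  let total := PySem.Int.floordiv (3 * n * (n + 1)) 2
  let total_squares := PySem.Int.floordiv (3 * n * (n + 1) * (2 * n + 1)) 2
  [total, total_squares, n]

-- ===== PRECONDITION & SPEC =====
def Spec_build_progression (max_value : Int) (out : List Int) : Prop := out = build_progression_alt max_value
instance (max_value : Int) (out : List Int) : Decidable (Spec_build_progression max_value out) := by unfold Spec_build_progression; infer_instance

-- ===== CLAIM (what is proved, stated in full; the proofs are below) =====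
def Claim_equal_build_progression : Prop := ∀ (max_value : Int), Dom_build_progression max_value → Spec_build_progression max_value (build_progression max_value)

-- ===== LEMMAS AND PROOFS =====

def pvStep (st : Int × Int × Int) (i : Int) : Int × Int × Int :=
  (st.1 + i, st.2.1 + i ^ 2, st.2.2 + 1)

def pvS : Nat → Int
  | 0 => 0
  | n + 1 => pvS n + (3 + 3 * n)

def pvQ : Nat → Int
  | 0 => 0
  | n + 1 => pvQ n + (3 + 3 * (n : Int)) ^ 2

theorem pvFold_eq (n : Nat) :
    List.foldl pvStep (0, 0, 0) ((List.range n).map (fun k : Nat => (3 : Int) + 3 * (k : Int)))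
      = (pvS n, pvQ n, (n : Int)) := by
  induction n with
  | zero => simp [pvS, pvQ]
  | succ n ih =>
      rw [List.range_succ, List.map_append, List.foldl_append, ih]
      simp only [List.map_cons, List.map_nil, List.foldl_cons, List.foldl_nil, pvStep,
        pvS, pvQ, Prod.mk.injEq]
      push_cast
      exact ⟨trivial, trivial, rfl⟩


theorem pvS_closed (n : Nat) : 2 * pvS n = 3 * (n : Int) * ((n : Int) + 1) := by
  induction n with
  | zero => simp [pvS]
  | succ n ih =>
      show 2 * (pvS n + (3 + 3 * n)) = _
      push_cast
      rw [mul_add, ih]; ring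

theorem pvQ_closed (n : Nat) :
    2 * pvQ n = 3 * (n : Int) * ((n : Int) + 1) * (2 * (n : Int) + 1) := by
  induction n with
  | zero => simp [pvQ]
  | succ n ih =>
      show 2 * (pvQ n + (3 + 3 * (n : Int)) ^ 2) = _
      push_cast
      rw [mul_add, ih]; ring

theorem pvFloordiv_two_mul (s : Int) : PySem.Int.floordiv (2 * s) 2 = s := by
  simp [PySem.Int.floordiv, Int.mul_fdiv_cancel_left]

theorem build_progression_spec : Claim_equal_build_progression := by
  intro m _
  unfold Spec_build_progression build_progression build_progression_alt
  rw [PySem.List.pyRange_of_pos 3 (m + 1) (by norm_num)]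
  have harg : (m + 1 - 3 + 3 - 1) = m := by ring
  rw [harg]
  set N : Nat := if (3 : Int) < m + 1 then ((m / 3).toNat) else 0 with hN
  have hNB : PySem.Int.floordiv (max m 0) 3 = (N : Int) := by
    rw [PySem.Int.floordiv, Int.fdiv_eq_ediv, hN]
    split_ifs <;> omega
  rw [hNB]
  dsimp only
  have e1 : PySem.Int.floordiv (3 * (N : Int) * ((N : Int) + 1)) 2 = pvS N := by
    rw [← pvS_closed, pvFloordiv_two_mul]
  have e2 : PySem.Int.floordiv (3 * (N : Int) * ((N : Int) + 1) * (2 * (N : Int) + 1)) 2 = pvQ N := by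
    rw [← pvQ_closed, pvFloordiv_two_mul]
  rw [e1, e2,
    show (fun (st : Int × Int × Int) i => (st.1 + i, st.2.1 + i ^ 2, st.2.2 + 1)) = pvStep from rfl,
    pvFold_eq N]
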